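-- pv_equiv track=rewrite | github.com/nickdrivergit/aoc | 2025/2/solution1.py | generate_num_patterns
-- ===== SOURCE A (Python) =====
-- def generate_num_patterns(max_value: int):
--     pattern_number_array = []
--     max_len = len(str(max_value))
--
--     for total_length in range (2, max_len + 1, 2):
--         half_length = total_length // 2
--
--         half_start = 10 ** (half_length - 1)
--         half_end = 10 ** half_length
--
--         factor = 10 ** half_length + 1
--
--         for half in range(half_start, half_end):
--             pattern_number = half * factor
--             if pattern_number > max_value:
--                 break
--             pattern_number_array.append(pattern_number)
--
--     return pattern_number_array
-- ===== SOURCE B (Python) =====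
-- def generate_num_patterns(max_value: int):
--     # Single flat pass over every candidate half-value; the pattern number is
--     # rebuilt from each half's own digit count, and out-of-range candidates are
--     # filtered instead of breaking out of per-length blocks.
--     pattern_number_array = []
--     limit = 10 ** (len(str(max_value)) // 2)
--     for half in range(1, limit):
--         pattern_number = half * 10 ** len(str(half)) + half
--         if pattern_number <= max_value:
--             pattern_number_array.append(pattern_number)
--     return pattern_number_array
-- ===== Notes on version B (the rewrite author's own statement) =====
-- stated objective: simpler
-- what changed: A's nested structure (outer loop over even total lengths with precomputed half_start/half_end/factor and an inner break loop) is replaced by one flat loop over every candidate half-value that rebuilds each pattern from the half's own digit count (the half times a power of ten given by its digit count, plus the half) and keeps it by a simple filter, so the outer length loop, the factor bookkeeping and the break disappear.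
import Mathlib
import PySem

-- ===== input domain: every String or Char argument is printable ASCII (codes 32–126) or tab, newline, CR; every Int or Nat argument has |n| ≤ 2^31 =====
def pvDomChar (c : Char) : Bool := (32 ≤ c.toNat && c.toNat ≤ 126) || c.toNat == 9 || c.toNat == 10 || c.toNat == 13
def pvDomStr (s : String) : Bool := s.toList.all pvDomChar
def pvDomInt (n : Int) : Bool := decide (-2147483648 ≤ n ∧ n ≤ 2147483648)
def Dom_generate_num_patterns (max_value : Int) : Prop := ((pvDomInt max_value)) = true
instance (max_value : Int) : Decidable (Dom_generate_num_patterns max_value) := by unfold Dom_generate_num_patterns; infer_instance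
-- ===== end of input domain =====

-- B replaces A's nested length/half loops with break by one flat filtered pass that rebuilds each pattern from the half's own digit count ('simpler').

-- ===== PORT A =====
-- inner 'for half in range(...)' with its break, as structural recursion over the range list
def pvInnerA (max_value factor : Int) (acc : List Int) : List Int → List Int
  | [] => acc
  | h :: t =>
      let pattern_number := h * factor
      if pattern_number > max_value then acc
      else pvInnerA max_value factor (acc ++ [pattern_number]) t

def generate_num_patterns (max_value : Int) : List Int :=
  let max_len : Int := (PySem.Int.toStr max_value).toList.length
  (PySem.List.pyRange 2 (max_len + 1) 2).foldl
    (fun pattern_number_array total_length =>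
      let half_length := PySem.Int.floordiv total_length 2
      -- exponents are provably ≥ 0 here (total_length ≥ 2), so '.toNat' is exact
      let half_start := (10 : Int) ^ (half_length - 1).toNat
      let half_end := (10 : Int) ^ half_length.toNat
      let factor := (10 : Int) ^ half_length.toNat + 1
      pvInnerA max_value factor pattern_number_array
        (PySem.List.pyRange half_start half_end 1)) []

-- ===== PORT B =====
def generate_num_patterns_alt (max_value : Int) : List Int :=
  let max_len : Int := (PySem.Int.toStr max_value).toList.length
  -- the exponent 'max_len // 2' is ≥ 0 (a string length), so '.toNat' is exact;
  -- 'len(str(half))' is a Nat and is used as the exponent directly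
  let limit : Int := (10 : Int) ^ (PySem.Int.floordiv max_len 2).toNat
  (PySem.List.pyRange 1 limit 1).foldl
    (fun pattern_number_array half =>
      let pattern_number := half * (10 : Int) ^ ((PySem.Int.toStr half).toList.length) + half
      if pattern_number ≤ max_value then pattern_number_array ++ [pattern_number]
      else pattern_number_array) []

-- ===== PRECONDITION & SPEC =====
def Spec_generate_num_patterns (max_value : Int) (out : List Int) : Prop := out = generate_num_patterns_alt max_value
instance (max_value : Int) (out : List Int) : Decidable (Spec_generate_num_patterns max_value out) := by unfold Spec_generate_num_patterns; infer_instance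

-- ===== CLAIM (what is proved, stated in full; the proofs are below) =====
def Claim_equal_generate_num_patterns : Prop := ∀ (max_value : Int), Dom_generate_num_patterns max_value → Spec_generate_num_patterns max_value (generate_num_patterns max_value)

-- ===== LEMMAS AND PROOFS =====

-- common normal form: the block of pattern numbers whose half has j+1 digits
def pvBlk (mv : Int) (j : Nat) : List Int :=
  let f : Int := (10 : Int) ^ (j + 1) + 1
  (PySem.List.pyRange ((10 : Int) ^ j)
      (min ((10 : Int) ^ (j + 1)) (PySem.Int.floordiv mv f + 1)) 1).map (fun h => h * f)

-- A's break loop keeps exactly the longest prefix of halves with h*factor ≤ max_value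
lemma pvInnerA_eq_takeWhile (m f : Int) (acc l : List Int) :
    pvInnerA m f acc l = acc ++ (l.takeWhile (fun h => decide (h * f ≤ m))).map (fun h => h * f) := by
  induction l generalizing acc with
  | nil => simp [pvInnerA]
  | cons h t ih =>
      simp only [pvInnerA, List.takeWhile]
      by_cases hc : h * f ≤ m
      · simp [not_lt.mpr hc, hc, ih]
      · simp [lt_of_not_ge hc, hc]

-- takeWhile (· ≤ k) on an increasing range is the range cut at min b (k+1)
lemma takeWhile_pyRange_le (a b k : Int) :
    (PySem.List.pyRange a b 1).takeWhile (fun h => decide (h ≤ k)) =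
      PySem.List.pyRange a (min b (k + 1)) 1 := by
  by_cases hab : b ≤ a
  · rw [PySem.List.pyRange_one_eq_nil hab, PySem.List.pyRange_one_eq_nil (by omega)]
    rfl
  · rw [not_le] at hab
    rw [PySem.List.pyRange_one_cons hab]
    simp only [List.takeWhile]
    by_cases hk : a ≤ k
    · rw [PySem.List.pyRange_one_cons (by omega : a < min b (k + 1))]
      simp only [hk, decide_true]
      rw [takeWhile_pyRange_le (a + 1) b k]
    · rw [PySem.List.pyRange_one_eq_nil (by omega : min b (k + 1) ≤ a)]
      simp [hk]
termination_by (b - a).toNat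
decreasing_by omega

-- filter (· ≤ k) on an increasing range is the same cut (the kept elements form a prefix)
lemma filter_pyRange_le (a b k : Int) :
    (PySem.List.pyRange a b 1).filter (fun h => decide (h ≤ k)) =
      PySem.List.pyRange a (min b (k + 1)) 1 := by
  by_cases hab : b ≤ a
  · rw [PySem.List.pyRange_one_eq_nil hab, PySem.List.pyRange_one_eq_nil (by omega)]
    rfl
  · rw [not_le] at hab
    rw [PySem.List.pyRange_one_cons hab]
    simp only [List.filter]
    by_cases hk : a ≤ k
    · rw [PySem.List.pyRange_one_cons (by omega : a < min b (k + 1))]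
      simp only [hk, decide_true]
      rw [filter_pyRange_le (a + 1) b k]
    · simp only [hk, decide_false]
      rw [filter_pyRange_le (a + 1) b k,
        PySem.List.pyRange_one_eq_nil (by omega : min b (k + 1) ≤ a + 1),
        PySem.List.pyRange_one_eq_nil (by omega : min b (k + 1) ≤ a)]
termination_by (b - a).toNat
decreasing_by all_goals omega

-- B's filtered append loop as filter-then-map
lemma foldl_filter_map (mv : Int) (f : Int → Int) (l : List Int) (acc : List Int) :
    l.foldl (fun a h => if f h ≤ mv then a ++ [f h] else a) acc
      = acc ++ (l.filter (fun h => decide (f h ≤ mv))).map f := by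
  induction l generalizing acc with
  | nil => simp
  | cons h t ih =>
      simp only [List.foldl_cons, List.filter_cons]
      by_cases hc : f h ≤ mv
      · simp [hc, ih]
      · simp [hc, ih]

-- range(2, M+1, 2) enumerates 2*(j+1) for j < M//2
lemma stepTwo (M : Int) (hM : 0 ≤ M) :
    PySem.List.pyRange 2 (M + 1) 2 = (List.range (M / 2).toNat).map (fun j => ((2 * (j + 1) : Nat) : Int)) := by
  simp only [PySem.List.pyRange, if_neg (by norm_num : ¬(2:Int) = 0), if_pos (by norm_num : (0:Int) < 2)]
  have hc : (if (2:Int) < M + 1 then ((M + 1 - 2 + 2 - 1) / 2).toNat else 0) = (M / 2).toNat := by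
    split_ifs <;> omega
  rw [hc]
  exact List.map_congr_left (fun x _ => by push_cast; ring)

-- range(1, 10^K) splits into the digit-count blocks
lemma split10 (K : Nat) :
    PySem.List.pyRange 1 ((10 : Int) ^ K) 1 =
      (List.range K).flatMap (fun j => PySem.List.pyRange ((10 : Int) ^ j) ((10 : Int) ^ (j + 1)) 1) := by
  induction K with
  | zero => simp
  | succ K ih =>
      rw [List.range_succ, List.flatMap_append, ← ih]
      simp only [List.flatMap_cons, List.flatMap_nil, List.append_nil]
      exact PySem.List.pyRange_one_append 1 ((10:Int)^K) ((10:Int)^(K+1))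
        (one_le_pow₀ (by norm_num)) (pow_le_pow_right₀ (by norm_num) (Nat.le_succ K))

-- decimal digit count of n with 10^j ≤ n < 10^(j+1) is j+1
lemma toDigits_len10 (j : Nat) : ∀ (n : Nat), 10 ^ j ≤ n → n < 10 ^ (j + 1) → (Nat.toDigits 10 n).length = j + 1 := by
  induction j with
  | zero =>
      intro n _ h2
      rw [Nat.toDigits_of_lt_base (by simpa using h2)]
      rfl
  | succ j ih =>
      intro n h1 h2
      have h10 : ¬ n < 10 := by
        have : (10:Nat) ≤ 10 ^ (j + 1) := by
          calc (10:Nat) = 10 ^ 1 := (pow_one 10).symm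
          _ ≤ 10 ^ (j + 1) := Nat.pow_le_pow_right (by norm_num) (by omega)
        omega
      rw [Nat.toDigits_eq_if (by norm_num), if_neg h10, List.length_append]
      have hlo : 10 ^ j ≤ n / 10 := by
        rw [Nat.le_div_iff_mul_le (by norm_num)]
        calc 10 ^ j * 10 = 10 ^ (j + 1) := (pow_succ 10 j).symm
        _ ≤ n := h1
      have hhi : n / 10 < 10 ^ (j + 1) := by
        rw [Nat.div_lt_iff_lt_mul (by norm_num)]
        calc n < 10 ^ (j + 1 + 1) := h2
        _ = 10 ^ (j + 1) * 10 := pow_succ 10 (j + 1)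
      rw [ih (n / 10) hlo hhi]
      rfl

lemma len_toStr (j : Nat) (h : Int) (h1 : (10 : Int) ^ j ≤ h) (h2 : h < (10 : Int) ^ (j + 1)) :
    (PySem.Int.toStr h).toList.length = j + 1 := by
  have hpos : 0 < h := lt_of_lt_of_le (by positivity) h1
  rw [PySem.Int.toList_toStr]
  simp only [PySem.Int.toChars, if_neg (by omega : ¬ h < 0)]
  apply toDigits_len10
  · have e : ((10 ^ j : Nat) : Int) ≤ h := by push_cast; exact h1
    omega
  · have e : h < ((10 ^ (j+1) : Nat) : Int) := by push_cast; exact h2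
    omega

lemma filter_map_flatMap {α : Type} (l : List α) (g : α → List Int) (p : Int → Bool) (f : Int → Int) :
    ((l.flatMap g).filter p).map f = l.flatMap (fun x => ((g x).filter p).map f) := by
  induction l with
  | nil => simp
  | cons x t ih => simp [List.filter_append, ih]

-- per-block reduction of A's body
lemma bodyA (mv : Int) (acc : List Int) (j : Nat) :
    pvInnerA mv ((10 : Int) ^ (PySem.Int.floordiv ((2 * (j + 1) : Nat) : Int) 2).toNat + 1) acc
      (PySem.List.pyRange ((10 : Int) ^ ((PySem.Int.floordiv ((2 * (j + 1) : Nat) : Int) 2) - 1).toNat)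
        ((10 : Int) ^ (PySem.Int.floordiv ((2 * (j + 1) : Nat) : Int) 2).toNat) 1)
      = acc ++ pvBlk mv j := by
  have hfd : PySem.Int.floordiv ((2 * (j + 1) : Nat) : Int) 2 = ((j : Int) + 1) := by
    rw [PySem.Int.floordiv_eq_ediv_of_pos (by norm_num)]
    push_cast
    omega
  rw [hfd]
  have e1 : (((j : Int) + 1) - 1).toNat = j := by omega
  have e2 : ((j : Int) + 1).toNat = j + 1 := by omega
  rw [e1, e2, pvInnerA_eq_takeWhile]
  congr 1
  have hf : (0 : Int) < 10 ^ (j + 1) + 1 := by positivity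
  have hpred : (fun h : Int => decide (h * ((10 : Int) ^ (j + 1) + 1) ≤ mv))
      = (fun h : Int => decide (h ≤ PySem.Int.floordiv mv ((10 : Int) ^ (j + 1) + 1))) := by
    funext h
    simp only [decide_eq_decide]
    rw [PySem.Int.le_floordiv_iff_mul_le hf]
  rw [hpred, takeWhile_pyRange_le]
  simp [pvBlk]

-- per-block reduction of B's filtered pass
lemma bodyB (mv : Int) (j : Nat) :
    ((PySem.List.pyRange ((10 : Int) ^ j) ((10 : Int) ^ (j + 1)) 1).filter
        (fun h => decide (h * (10 : Int) ^ ((PySem.Int.toStr h).toList.length) + h ≤ mv))).map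
      (fun h => h * (10 : Int) ^ ((PySem.Int.toStr h).toList.length) + h)
      = pvBlk mv j := by
  have hf : (0 : Int) < 10 ^ (j + 1) + 1 := by positivity
  rw [List.filter_congr (q := fun h : Int => decide (h ≤ PySem.Int.floordiv mv ((10 : Int) ^ (j + 1) + 1)))
      (fun h hm => ?_)]
  · rw [filter_pyRange_le]
    simp only [pvBlk]
    apply List.map_congr_left
    intro h hm
    have hb := (PySem.List.mem_pyRange_one).1 hm
    have hlen := len_toStr j h hb.1 (lt_of_lt_of_le hb.2 (min_le_left _ _))
    rw [hlen]
    ring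
  · have hb := (PySem.List.mem_pyRange_one).1 hm
    have hlen := len_toStr j h hb.1 hb.2
    rw [hlen]
    simp only [decide_eq_decide]
    rw [PySem.Int.le_floordiv_iff_mul_le hf]
    constructor <;> intro hx <;> nlinarith [hx]

lemma A_nf (mv : Int) :
    generate_num_patterns mv
      = (List.range ((((PySem.Int.toStr mv).toList.length : Int)) / 2).toNat).flatMap (pvBlk mv) := by
  simp only [generate_num_patterns]
  rw [stepTwo _ (Int.natCast_nonneg _), List.foldl_map]
  rw [PySem.List.foldl_congr_mem _ _ (fun (acc : List Int) (j : Nat) => acc ++ pvBlk mv j) _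
      (fun acc j _ => bodyA mv acc j)]
  rw [PySem.List.foldl_append_eq_flatMap]
  simp

lemma B_nf (mv : Int) :
    generate_num_patterns_alt mv
      = (List.range ((((PySem.Int.toStr mv).toList.length : Int)) / 2).toNat).flatMap (pvBlk mv) := by
  simp only [generate_num_patterns_alt]
  rw [PySem.Int.floordiv_eq_ediv_of_pos (by norm_num : (0:Int) < 2)]
  rw [foldl_filter_map mv (fun h => h * (10 : Int) ^ ((PySem.Int.toStr h).toList.length) + h)]
  rw [List.nil_append, split10, filter_map_flatMap]
  simp only [bodyB]

-- ===== VERDICT (by name: the statement is the Claim_ definition above) =====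
theorem generate_num_patterns_spec : Claim_equal_generate_num_patterns := by
  intro max_value _
  unfold Spec_generate_num_patterns
  rw [A_nf, B_nf]
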